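-- pv_equiv track=rewrite | github.com/altingia/dante | profrep_pd.py | handle_zero_lines
-- ===== SOURCE A (Python) =====
-- from operator import itemgetter
-- from itertools import groupby
--
-- def handle_zero_lines(repeat_subhits):
-- 	''' Clean lines which contains only zeros, i.e. positons which do not contain any hit. However border zero positions need to be preserved due to correct graphs plotting '''
-- 	zero_idx = [idx for idx, val in enumerate(repeat_subhits) if val == 0]
-- 	indices = [idx for idx, val in enumerate(repeat_subhits) if val != 0]
-- 	zero_breakpoints = []
-- 	for key, group in groupby(enumerate(zero_idx), lambda index_item: index_item[0] - index_item[1]):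
-- 		group = list(map(itemgetter(1),group))
-- 		zero_breakpoints.append(group[0])
-- 		zero_breakpoints.append(group[-1])
-- 	if indices:
-- 		indices.extend(zero_breakpoints)
-- 		indices = sorted(set(indices), key=int)
-- 	else:
-- 		indices = []
-- 	return indices
-- ===== SOURCE B (Python) =====
-- def handle_zero_lines(repeat_subhits):
-- 	''' Clean lines which contains only zeros, i.e. positons which do not contain any hit. However border zero positions need to be preserved due to correct graphs plotting '''
-- 	n = len(repeat_subhits)
-- 	if all(v == 0 for v in repeat_subhits):
-- 		return []
-- 	return [i for i, v in enumerate(repeat_subhits)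
-- 	        if v != 0 or i == 0 or i == n - 1
-- 	        or repeat_subhits[i - 1] != 0 or repeat_subhits[i + 1] != 0]
-- ===== Notes on version B (the rewrite author's own statement) =====
-- stated objective: faster
-- what changed: Replaces the enumerate/groupby run-grouping plus sorted(set(...)) with a single linear pass that emits nonzero positions and zero-run border positions directly in ascending order (no grouping, no set, no sort).
import Mathlib
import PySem

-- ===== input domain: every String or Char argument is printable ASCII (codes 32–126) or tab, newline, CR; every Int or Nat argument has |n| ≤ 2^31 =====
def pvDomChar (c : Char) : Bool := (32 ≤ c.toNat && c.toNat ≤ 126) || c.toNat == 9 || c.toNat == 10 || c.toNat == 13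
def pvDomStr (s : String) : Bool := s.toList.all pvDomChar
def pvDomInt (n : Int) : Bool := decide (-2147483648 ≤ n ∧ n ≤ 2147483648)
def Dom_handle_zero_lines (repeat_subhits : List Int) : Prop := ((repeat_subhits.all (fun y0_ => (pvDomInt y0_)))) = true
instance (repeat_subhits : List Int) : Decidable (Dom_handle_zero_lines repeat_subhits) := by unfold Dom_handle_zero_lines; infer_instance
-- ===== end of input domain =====

-- B replaces A's enumerate/groupby zero-run grouping + sorted(set(...)) with a single linear
-- pass that emits nonzero positions and zero-run border positions already in ascending order.

-- ===== PORT A =====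
-- itertools.groupby(xs, key): splits xs into maximal runs of adjacent elements with equal key
def pvGroupByAux (key : Int × Int → Int) (k : Int) (cur : List (Int × Int)) :
    List (Int × Int) → List (List (Int × Int))
  | [] => [cur]
  | a :: t =>
    if key a == k then pvGroupByAux key k (cur ++ [a]) t
    else cur :: pvGroupByAux key (key a) [a] t

def pvGroupBy (key : Int × Int → Int) : List (Int × Int) → List (List (Int × Int))
  | [] => []
  | a :: t => pvGroupByAux key (key a) [a] t

def handle_zero_lines (repeat_subhits : List Int) : List Int :=
  let zero_idx := ((PySem.List.enumerate repeat_subhits 0).filter (fun p => p.2 == 0)).map (fun p => p.1)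
  let indices := ((PySem.List.enumerate repeat_subhits 0).filter (fun p => p.2 != 0)).map (fun p => p.1)
  let zero_breakpoints :=
    (pvGroupBy (fun p => p.1 - p.2) (PySem.List.enumerate zero_idx 0)).foldl
      (fun acc g =>
        let g' := g.map (fun p => p.2)
        acc ++ [g'.headD 0, g'.getLastD 0]) []
  if indices ≠ [] then
    PySem.List.sorted (PySem.Set.ofList (indices ++ zero_breakpoints)) (fun x => x) false
  else []

-- ===== PORT B =====
def handle_zero_lines_alt (repeat_subhits : List Int) : List Int :=
  let n : Int := repeat_subhits.length
  if repeat_subhits.all (fun v => v == 0) then []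
  else
    ((PySem.List.enumerate repeat_subhits 0).filter (fun p =>
        (p.2 != 0) || (p.1 == 0) || (p.1 == n - 1) ||
        (PySem.List.pyGetD repeat_subhits (p.1 - 1) 0 != 0) ||
        (PySem.List.pyGetD repeat_subhits (p.1 + 1) 0 != 0))).map (fun p => p.1)

-- ===== PRECONDITION & SPEC =====
def Spec_handle_zero_lines (repeat_subhits : List Int) (out : List Int) : Prop := out = handle_zero_lines_alt repeat_subhits
instance (repeat_subhits : List Int) (out : List Int) : Decidable (Spec_handle_zero_lines repeat_subhits out) := by unfold Spec_handle_zero_lines; infer_instance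

-- ===== CLAIM (what is proved, stated in full; the proofs are below) =====
def Claim_equal_handle_zero_lines : Prop := ∀ (repeat_subhits : List Int), Dom_handle_zero_lines repeat_subhits → Spec_handle_zero_lines repeat_subhits (handle_zero_lines repeat_subhits)

-- ===== LEMMAS AND PROOFS =====

-- the breakpoints (group[0] and group[-1] of each group) collected from a list of groups
def pvBps (gs : List (List (Int × Int))) : List Int :=
  gs.flatMap (fun g => [(g.map (fun p => p.2)).headD 0, (g.map (fun p => p.2)).getLastD 0])

lemma pvLastD_concat (xs : List Int) (a : Int) : (xs ++ [a]).getLastD 0 = a := by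
  simp

-- members of the breakpoint list built by pvGroupByAux: the head value h of the open run,
-- plus the last and (except for the open run) first element of every maximal run of
-- consecutive values in prev :: z
lemma pvAux_mem (z : List Int) : ∀ (i prev h : Int) (cur : List (Int × Int)) (y : Int),
    cur ≠ [] →
    (cur.map (fun p => p.2)).headD 0 = h →
    (cur.map (fun p => p.2)).getLastD 0 = prev →
    (prev :: z).Pairwise (· < ·) →
    (y ∈ pvBps (pvGroupByAux (fun p => p.1 - p.2) (i - 1 - prev) cur (PySem.List.enumerate z i)) ↔
      y = h ∨ (y ∈ prev :: z ∧ y + 1 ∉ prev :: z) ∨ (y ∈ z ∧ y - 1 ∉ prev :: z)) := by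
  induction z with
  | nil =>
    intro i prev h cur y hne hh hl hp
    have e1 : PySem.List.enumerate ([] : List Int) i = [] := rfl
    rw [e1]
    have e2 : pvBps (pvGroupByAux (fun p => p.1 - p.2) (i - 1 - prev) cur []) = [h, prev] := by
      simp only [pvGroupByAux, pvBps, List.flatMap_cons, List.flatMap_nil, List.append_nil]
      rw [hh, hl]
    rw [e2]
    simp only [List.mem_cons, List.not_mem_nil]
    constructor
    · rintro (rfl | rfl | hc)
      · exact Or.inl rfl
      · exact Or.inr (Or.inl ⟨Or.inl rfl, by rintro (h1 | h1) <;> [omega; exact h1]⟩)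
      · exact absurd hc (by simp)
    · rintro (rfl | ⟨hy, -⟩ | ⟨hy, -⟩)
      · exact Or.inl rfl
      · rcases hy with rfl | hc
        · exact Or.inr (Or.inl rfl)
        · exact absurd hc (by simp)
      · exact absurd hy (by simp)
  | cons a z' ih =>
    intro i prev h cur y hne hh hl hp
    rcases cur with _ | ⟨c, t⟩
    · exact absurd rfl hne
    have hprev : prev < a := (List.pairwise_cons.mp hp).1 a (by simp)
    have hptail : (a :: z').Pairwise (· < ·) := (List.pairwise_cons.mp hp).2
    have hz' : ∀ b ∈ z', a < b := (List.pairwise_cons.mp hptail).1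
    have e1 : PySem.List.enumerate (a :: z') i = (i, a) :: PySem.List.enumerate z' (i + 1) :=
      PySem.List.enumerate_cons _ _ _
    rw [e1]
    by_cases hcase : a = prev + 1
    · -- key equal: the run continues through (i, a)
      have hkey : (((i : Int) - a == i - 1 - prev) : Bool) = true := by
        simp only [beq_iff_eq]; omega
      have e2 : pvGroupByAux (fun p => p.1 - p.2) (i - 1 - prev) (c :: t)
            ((i, a) :: PySem.List.enumerate z' (i + 1))
          = pvGroupByAux (fun p => p.1 - p.2) (i - 1 - prev) ((c :: t) ++ [(i, a)])
            (PySem.List.enumerate z' (i + 1)) := by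
        simp only [pvGroupByAux, hkey, if_true]
      have hlast : (((c :: t) ++ [(i, a)]).map (fun p => p.2)).getLastD 0 = a := by
        rw [List.map_append]; exact pvLastD_concat _ _
      rw [e2, show (i : Int) - 1 - prev = (i + 1) - 1 - a from by omega]
      rw [ih (i + 1) a h ((c :: t) ++ [(i, a)]) y (by simp) (by simpa using hh) hlast hptail]
      simp only [List.mem_cons]
      constructor
      · rintro (rfl | ⟨hy, hy1⟩ | ⟨hy, hy1⟩)
        · exact Or.inl rfl
        · refine Or.inr (Or.inl ⟨Or.inr hy, ?_⟩)
          rintro (h1 | h1)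
          · rcases hy with rfl | hy
            · omega
            · have := hz' y hy; omega
          · exact hy1 h1
        · have hya := hz' y hy
          refine Or.inr (Or.inr ⟨Or.inr hy, ?_⟩)
          rintro (h1 | h1)
          · omega
          · exact hy1 h1
      · rintro (rfl | ⟨hy, hy1⟩ | ⟨hy, hy1⟩)
        · exact Or.inl rfl
        · rcases hy with rfl | hy
          · exact absurd (Or.inl (by omega)) hy1
          · exact Or.inr (Or.inl ⟨hy, fun h1 => hy1 (Or.inr h1)⟩)
        · rcases hy with rfl | hy
          · exact absurd (Or.inl (by omega)) hy1
          · exact Or.inr (Or.inr ⟨hy, fun h1 => hy1 (Or.inr h1)⟩)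
    · -- key differs: the run ends at prev, a new run starts at (i, a)
      have hkey : (((i : Int) - a == i - 1 - prev) : Bool) = false := by
        simp only [beq_eq_false_iff_ne, ne_eq]; omega
      have ha2 : prev + 1 < a := by omega
      have e2 : pvGroupByAux (fun p => p.1 - p.2) (i - 1 - prev) (c :: t)
            ((i, a) :: PySem.List.enumerate z' (i + 1))
          = (c :: t) :: pvGroupByAux (fun p => p.1 - p.2) ((i : Int) - a) [(i, a)]
            (PySem.List.enumerate z' (i + 1)) := by
        simp only [pvGroupByAux, hkey, Bool.false_eq_true, if_false]
      have e3 : pvBps ((c :: t) :: pvGroupByAux (fun p => p.1 - p.2) ((i : Int) - a) [(i, a)]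
            (PySem.List.enumerate z' (i + 1)))
          = [h, prev] ++ pvBps (pvGroupByAux (fun p => p.1 - p.2) ((i : Int) - a) [(i, a)]
            (PySem.List.enumerate z' (i + 1))) := by
      -- pvBps (g :: gs) = [headD, getLastD] ++ pvBps gs
        simp only [pvBps, List.flatMap_cons]
        rw [hh, hl]
      rw [e2, e3, show (i : Int) - a = (i + 1) - 1 - a from by omega, List.mem_append]
      rw [ih (i + 1) a a [(i, a)] y (by simp) (by simp) (by simp) hptail]
      simp only [List.mem_cons, List.not_mem_nil]
      constructor
      · rintro ((rfl | rfl | hc) | rfl | ⟨hy, hy1⟩ | ⟨hy, hy1⟩)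
        · exact Or.inl rfl
        · refine Or.inr (Or.inl ⟨Or.inl rfl, ?_⟩)
          rintro (h1 | h1 | h1)
          · omega
          · omega
          · have := hz' _ h1; omega
        · exact absurd hc (by simp)
        · refine Or.inr (Or.inr ⟨Or.inl rfl, ?_⟩)
          rintro (h1 | h1 | h1)
          · omega
          · omega
          · have := hz' _ h1; omega
        · refine Or.inr (Or.inl ⟨Or.inr hy, ?_⟩)
          rintro (h1 | h1)
          · rcases hy with rfl | hy
            · omega
            · have := hz' y hy; omega
          · exact hy1 h1
        · have hya := hz' y hy
          refine Or.inr (Or.inr ⟨Or.inr hy, ?_⟩)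
          rintro (h1 | h1)
          · omega
          · exact hy1 h1
      · rintro (rfl | ⟨hy, hy1⟩ | ⟨hy, hy1⟩)
        · exact Or.inl (Or.inl rfl)
        · rcases hy with rfl | hy
          · exact Or.inl (Or.inr (Or.inl rfl))
          · exact Or.inr (Or.inr (Or.inl ⟨hy, fun h1 => hy1 (Or.inr h1)⟩))
        · rcases hy with rfl | hy
          · exact Or.inr (Or.inl rfl)
          · exact Or.inr (Or.inr (Or.inr ⟨hy, fun h1 => hy1 (Or.inr h1)⟩))

-- for a strictly increasing z, the collected breakpoints are exactly the elements of z
-- whose predecessor or successor value is missing from z (the zero-run borders)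
lemma pv_bps_mem (z : List Int) (hz : z.Pairwise (· < ·)) (y : Int) :
    y ∈ pvBps (pvGroupBy (fun p => p.1 - p.2) (PySem.List.enumerate z 0)) ↔
      y ∈ z ∧ (y - 1 ∉ z ∨ y + 1 ∉ z) := by
  rcases z with _ | ⟨a, z'⟩
  · simp [pvGroupBy, pvBps, PySem.List.enumerate]
  · have hz' : ∀ b ∈ z', a < b := (List.pairwise_cons.mp hz).1
    have e1 : PySem.List.enumerate (a :: z') 0 = (0, a) :: PySem.List.enumerate z' 1 :=
      PySem.List.enumerate_cons _ _ _
    have e2 : pvGroupBy (fun p => p.1 - p.2) ((0, a) :: PySem.List.enumerate z' 1)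
        = pvGroupByAux (fun p => p.1 - p.2) ((1 : Int) - 1 - a) [(0, a)] (PySem.List.enumerate z' 1) := by
      simp only [pvGroupBy]
      norm_num
    rw [e1, e2, pvAux_mem z' 1 a a [(0, a)] y (by simp) (by simp) (by simp) hz]
    simp only [List.mem_cons]
    constructor
    · rintro (rfl | ⟨hy, hy1⟩ | ⟨hy, hy1⟩)
      · refine ⟨Or.inl rfl, Or.inl ?_⟩
        rintro (h1 | h1)
        · omega
        · have := hz' _ h1; omega
      · exact ⟨hy, Or.inr hy1⟩
      · exact ⟨Or.inr hy, Or.inl hy1⟩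
    · rintro ⟨hy, hy1⟩
      rcases hy with rfl | hy
      · exact Or.inl rfl
      · rcases hy1 with hy1 | hy1
        · exact Or.inr (Or.inr ⟨hy, hy1⟩)
        · exact Or.inr (Or.inl ⟨Or.inr hy, hy1⟩)

-- membership in `[p[0] for p in filter(q, enumerate(l))]`

lemma pv_mem_enum_filter_map (l : List Int) (q : Int × Int → Bool) (x : Int) :
    x ∈ ((PySem.List.enumerate l 0).filter q).map (fun p => p.1) ↔
      ∃ (k : Nat) (hk : k < l.length), x = (k : Int) ∧ q ((k : Int), l[k]) = true := by
  simp only [List.mem_map, List.mem_filter, PySem.List.mem_enumerate_iff]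
  constructor
  · rintro ⟨p, ⟨⟨k, hk, rfl⟩, hq⟩, rfl⟩
    refine ⟨k, hk, by simp, by simpa using hq⟩
  · rintro ⟨k, hk, rfl, hq⟩
    exact ⟨((k : Int), l[k]), ⟨⟨k, hk, by simp⟩, hq⟩, rfl⟩

lemma pv_pairwise_enum_filter_map (l : List Int) (q : Int × Int → Bool) :
    (((PySem.List.enumerate l 0).filter q).map (fun p => p.1)).Pairwise (· < ·) := by
  rw [List.pairwise_map]
  exact (PySem.List.pairwise_lt_enumerate l 0).filter q

-- the single linear-pass predicate both programs compute

-- the position predicate both programs keep: nonzero value, or a zero at a run border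
def pvP (l : List Int) (k : Nat) : Prop :=
  l.getD k 0 ≠ 0 ∨ k = 0 ∨ k = l.length - 1 ∨ (1 ≤ k ∧ l.getD (k - 1) 0 ≠ 0) ∨ l.getD (k + 1) 0 ≠ 0

-- B's filter condition at position k computes pvP
lemma pv_condB (l : List Int) (k : Nat) (hk : k < l.length) :
    ((l[k] != 0) || ((k : Int) == 0) || ((k : Int) == (l.length : Int) - 1) ||
      (PySem.List.pyGetD l ((k : Int) - 1) 0 != 0) ||
      (PySem.List.pyGetD l ((k : Int) + 1) 0 != 0)) = true ↔ pvP l k := by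
  by_cases hk0 : k = 0
  · subst hk0
    simp only [pvP]
    simp
  · have e1 : ((k : Int) - 1) = ((k - 1 : Nat) : Int) := by omega
    have e2 : ((k : Int) + 1) = ((k + 1 : Nat) : Int) := by push_cast; omega
    rw [e1, e2, PySem.List.pyGetD_natCast, PySem.List.pyGetD_natCast]
    simp only [Bool.or_eq_true, bne_iff_ne, beq_iff_eq, ne_eq, pvP, List.getD_eq_getElem l 0 hk]
    constructor
    · rintro ((((h | h) | h) | h) | h)
      · exact Or.inl h
      · omega
      · exact Or.inr (Or.inr (Or.inl (by omega)))
      · exact Or.inr (Or.inr (Or.inr (Or.inl ⟨by omega, h⟩)))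
      · exact Or.inr (Or.inr (Or.inr (Or.inr h)))
    · rintro (h | h | h | ⟨-, h⟩ | h)
      · exact Or.inl (Or.inl (Or.inl (Or.inl h)))
      · omega
      · exact Or.inl (Or.inl (Or.inr (by omega)))
      · exact Or.inl (Or.inr h)
      · exact Or.inr h

-- A's kept positions (nonzero indices ∪ zero-run breakpoints) are exactly the pvP positions
lemma pv_A_mem (l : List Int) (x : Int) :
    (x ∈ ((PySem.List.enumerate l 0).filter (fun p => p.2 != 0)).map (fun p => p.1) ∨
      (x ∈ ((PySem.List.enumerate l 0).filter (fun p => p.2 == 0)).map (fun p => p.1) ∧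
        (x - 1 ∉ ((PySem.List.enumerate l 0).filter (fun p => p.2 == 0)).map (fun p => p.1) ∨
         x + 1 ∉ ((PySem.List.enumerate l 0).filter (fun p => p.2 == 0)).map (fun p => p.1)))) ↔
      ∃ (k : Nat) (_hk : k < l.length), x = (k : Int) ∧ pvP l k := by
  rw [pv_mem_enum_filter_map, pv_mem_enum_filter_map]
  have hz1 : ∀ w : Int, w ∈ ((PySem.List.enumerate l 0).filter (fun p => p.2 == 0)).map (fun p => p.1) ↔
      ∃ (j : Nat) (hj : j < l.length), w = (j : Int) ∧ l[j] = 0 := by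
    intro w
    rw [pv_mem_enum_filter_map]
    simp only [beq_iff_eq]
  rw [hz1, hz1]
  simp only [bne_iff_ne, beq_iff_eq, ne_eq]
  constructor
  · rintro (⟨k, hk, rfl, hv⟩ | ⟨⟨k, hk, rfl, hv⟩, hb⟩)
    · exact ⟨k, hk, rfl, Or.inl (by rw [List.getD_eq_getElem l 0 hk]; exact hv)⟩
    · refine ⟨k, hk, rfl, ?_⟩
      unfold pvP
      rcases hb with hb | hb
      · by_cases hk0 : k = 0
        · exact Or.inr (Or.inl hk0)
        · refine Or.inr (Or.inr (Or.inr (Or.inl ⟨by omega, ?_⟩)))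
          rw [List.getD_eq_getElem l 0 (by omega : k - 1 < l.length)]
          intro h0
          exact hb ⟨k - 1, by omega, by omega, h0⟩
      · by_cases hk1 : k + 1 < l.length
        · refine Or.inr (Or.inr (Or.inr (Or.inr ?_)))
          rw [List.getD_eq_getElem l 0 hk1]
          intro h0
          exact hb ⟨k + 1, hk1, by omega, h0⟩
        · exact Or.inr (Or.inr (Or.inl (by omega)))
  · rintro ⟨k, hk, rfl, hP⟩
    by_cases hv : l[k] = 0
    · refine Or.inr ⟨⟨k, hk, rfl, hv⟩, ?_⟩
      unfold pvP at hP
      rw [List.getD_eq_getElem l 0 hk] at hP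
      rcases hP with h | h | h | ⟨h1, h2⟩ | h
      · exact absurd hv h
      · refine Or.inl ?_
        rintro ⟨j, hj, hje, -⟩
        omega
      · refine Or.inr ?_
        rintro ⟨j, hj, hje, -⟩
        omega
      · refine Or.inl ?_
        rintro ⟨j, hj, hje, hj0⟩
        have : j = k - 1 := by omega
        subst this
        rw [List.getD_eq_getElem l 0 (by omega : k - 1 < l.length)] at h2
        exact h2 hj0
      · refine Or.inr ?_
        rintro ⟨j, hj, hje, hj0⟩
        have : j = k + 1 := by omega
        subst this
        rw [List.getD_eq_getElem l 0 hj] at h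
        exact h hj0
    · exact Or.inl ⟨k, hk, rfl, hv⟩

lemma pv_main (l : List Int) : handle_zero_lines l = handle_zero_lines_alt l := by
  simp only [handle_zero_lines, handle_zero_lines_alt]
  by_cases hall : l.all (fun v => v == 0)
  · have hind : ((PySem.List.enumerate l 0).filter (fun p => p.2 != 0)).map (fun p => p.1) = [] := by
      rw [List.map_eq_nil_iff, List.filter_eq_nil_iff]
      intro p hp
      obtain ⟨k, hk, rfl⟩ := (PySem.List.mem_enumerate_iff _ _ _).mp hp
      have := List.all_eq_true.mp hall l[k] (l.getElem_mem hk)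
      simp only [beq_iff_eq] at this
      simp [this]
    rw [hall, hind]
    simp
  · have hne : ((PySem.List.enumerate l 0).filter (fun p => p.2 != 0)).map (fun p => p.1) ≠ [] := by
      simp only [List.all_eq_true, not_forall] at hall
      obtain ⟨v, hv, hv0⟩ := hall
      obtain ⟨k, hk, rfl⟩ := List.mem_iff_getElem.mp hv
      apply List.ne_nil_of_mem (a := (k : Int))
      rw [pv_mem_enum_filter_map]
      exact ⟨k, hk, rfl, by simpa using hv0⟩
    rw [if_pos hne, if_neg hall]
    -- sorted(set(indices ++ bps)) equals B's single-pass list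
    apply PySem.List.sorted_eq_of_perm_of_pairwise_lt
    · -- permutation: same members, both nodup
      have hpB := pv_pairwise_enum_filter_map l (fun p =>
        (p.2 != 0) || (p.1 == 0) || (p.1 == (l.length : Int) - 1) ||
        (PySem.List.pyGetD l (p.1 - 1) 0 != 0) ||
        (PySem.List.pyGetD l (p.1 + 1) 0 != 0))
      refine (List.perm_ext_iff_of_nodup (hpB.imp fun h => ne_of_lt h) (PySem.Set.nodup_ofList _)).mpr ?_
      intro x
      rw [PySem.Set.mem_ofList, List.mem_append]
      have hfoldl : ((pvGroupBy (fun p => p.1 - p.2)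
            (PySem.List.enumerate (((PySem.List.enumerate l 0).filter (fun p => p.2 == 0)).map (fun p => p.1)) 0)).foldl
            (fun acc g => acc ++ [(g.map (fun p => p.2)).headD 0, (g.map (fun p => p.2)).getLastD 0]) [])
          = pvBps (pvGroupBy (fun p => p.1 - p.2)
            (PySem.List.enumerate (((PySem.List.enumerate l 0).filter (fun p => p.2 == 0)).map (fun p => p.1)) 0)) := by
      -- 'out.append(first); out.append(last)' over the groups is a flatMap
        rw [PySem.List.foldl_append_eq_flatMap]
        simp [pvBps]
      rw [hfoldl, pv_bps_mem _ (pv_pairwise_enum_filter_map l _) x, pv_A_mem l x,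
        pv_mem_enum_filter_map]
      constructor
      · rintro ⟨k, hk, rfl, hc⟩
        exact ⟨k, hk, rfl, (pv_condB l k hk).mp (by simpa using hc)⟩
      · rintro ⟨k, hk, rfl, hc⟩
        exact ⟨k, hk, rfl, by simpa using (pv_condB l k hk).mpr hc⟩
    · exact pv_pairwise_enum_filter_map l _

-- ===== VERDICT (by name: the statement is the Claim_ definition above) =====
theorem handle_zero_lines_spec : Claim_equal_handle_zero_lines := by
  intro repeat_subhits _
  show handle_zero_lines repeat_subhits = handle_zero_lines_alt repeat_subhits
  exact pv_main repeat_subhits
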